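-- pv_equiv track=rewrite | github.com/charlloyd/cs205-hw1 | hw1-3.py | countpennies
-- ===== SOURCE A (Python) =====
-- def countpennies(n,ct):
--
--     # first phase - everyone adds n times
--     individual_count = 256 // n
--     leftovers = 256 % n
--     elapsed = individual_count - 1
--
--     # middle phase - some people add leftovers and some add theirs together
--     togethers = n - leftovers
--     if leftovers!=0:
--         togethers = (togethers // 2) + (togethers % 2) + leftovers
--         elapsed += 1
--         if ct==1:
--             elapsed += 1
--
--     # finish adding togethers
--     while togethers > 1:
--         togethers = (togethers // 2) + (togethers % 2)
--         elapsed += 1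
--         if ct==1:
--             elapsed += 1
--
--     return elapsed
--
-- n = list(range(1,150))
-- ===== SOURCE B (Python) =====
-- def countpennies(n, ct):
--     # closed form: number of ceiling-halving steps = (t-1).bit_length() for t > 1
--     q, r = divmod(256, n)
--     mult = 2 if ct == 1 else 1
--     if r:
--         t = (n - r + 1) // 2 + r
--         base = q + mult - 1
--     else:
--         t = n
--         base = q - 1
--     iters = (t - 1).bit_length() if t > 1 else 0
--     return base + mult * iters
-- ===== Notes on version B (the rewrite author's own statement) =====
-- stated objective: simpler
-- what changed: Replaces the while loop that repeatedly ceiling-halves 'togethers' with a closed form using integer bit_length ((t-1).bit_length() = number of halving steps), and folds the two phases into one divmod-based expression.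
import Mathlib
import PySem

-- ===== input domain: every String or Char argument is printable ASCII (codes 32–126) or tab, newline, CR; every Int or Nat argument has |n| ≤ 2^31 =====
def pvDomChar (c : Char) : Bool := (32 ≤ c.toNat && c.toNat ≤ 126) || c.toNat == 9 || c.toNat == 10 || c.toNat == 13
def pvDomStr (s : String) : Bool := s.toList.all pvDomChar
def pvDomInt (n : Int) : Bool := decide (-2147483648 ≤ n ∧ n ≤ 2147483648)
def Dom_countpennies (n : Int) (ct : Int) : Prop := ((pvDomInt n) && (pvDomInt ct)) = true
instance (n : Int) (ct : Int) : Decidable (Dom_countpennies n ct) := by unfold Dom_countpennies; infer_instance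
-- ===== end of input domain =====

-- B replaces A's ceiling-halving while loop by a closed form via integer bit_length (simpler; same values).

-- ===== PORT A =====
-- the 'while togethers > 1' loop of A, step for step
def countLoop (togethers : Int) (elapsed : Int) (ct : Int) : Int :=
  if togethers > 1 then
    countLoop (PySem.Int.floordiv togethers 2 + PySem.Int.mod togethers 2)
      (if ct = 1 then elapsed + 1 + 1 else elapsed + 1) ct
  else elapsed
termination_by togethers.toNat
decreasing_by
  rw [PySem.Int.floordiv_eq_ediv_of_pos (by norm_num), PySem.Int.mod_eq_emod_of_pos (by norm_num)]
  omega

def countpennies (n : Int) (ct : Int) : Int :=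
  let individual_count := PySem.Int.floordiv 256 n
  let leftovers := PySem.Int.mod 256 n
  let elapsed := individual_count - 1
  let togethers := n - leftovers
  if leftovers ≠ 0 then
    let togethers := PySem.Int.floordiv togethers 2 + PySem.Int.mod togethers 2 + leftovers
    let elapsed := elapsed + 1
    let elapsed := if ct = 1 then elapsed + 1 else elapsed
    countLoop togethers elapsed ct
  else
    countLoop togethers elapsed ct

-- ===== PORT B =====
def countpennies_alt (n : Int) (ct : Int) : Int :=
  let q := PySem.Int.floordiv 256 n
  let r := PySem.Int.mod 256 n
  let mult : Int := if ct = 1 then 2 else 1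
  let t := if r ≠ 0 then PySem.Int.floordiv (n - r + 1) 2 + r else n
  let base := if r ≠ 0 then q + mult - 1 else q - 1
  -- (t - 1).bit_length(): guarded by t > 1 exactly as in Source B
  let iters : Int := if t > 1 then (PySem.Int.bitLength (t - 1) : Int) else 0
  base + mult * iters

-- ===== PRECONDITION & SPEC =====
-- Pre_ excludes only n = 0, where the Python A raises ZeroDivisionError (B raises there too).
def Pre_countpennies (n : Int) (ct : Int) : Prop := n ≠ 0
instance (n : Int) (ct : Int) : Decidable (Pre_countpennies n ct) := by unfold Pre_countpennies; infer_instance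
def pvWitness_countpennies : Int × Int := (7, 1)

def Spec_countpennies (n : Int) (ct : Int) (out : Int) : Prop := out = countpennies_alt n ct
instance (n : Int) (ct : Int) (out : Int) : Decidable (Spec_countpennies n ct out) := by unfold Spec_countpennies; infer_instance

-- ===== CLAIM (what is proved, stated in full; the proofs are below) =====
def Claim_equal_countpennies : Prop := ∀ (n : Int) (ct : Int), Dom_countpennies n ct → Pre_countpennies n ct → Spec_countpennies n ct (countpennies n ct)

-- ===== LEMMAS AND PROOFS =====

-- the loop adds (if ct = 1 then 2 else 1) per iteration, and iterates bitLength (t-1) times when t > 1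
theorem countLoop_eq (t e ct : Int) :
    countLoop t e ct =
      e + (if ct = 1 then 2 else 1) * (if t > 1 then (PySem.Int.bitLength (t - 1) : Int) else 0) := by
  by_cases h : t > 1
  · have ih := countLoop_eq (PySem.Int.floordiv t 2 + PySem.Int.mod t 2)
      (if ct = 1 then e + 1 + 1 else e + 1) ct
    rw [countLoop, if_pos h, ih]
    rw [PySem.Int.floordiv_eq_ediv_of_pos (a := t) (by norm_num),
        PySem.Int.mod_eq_emod_of_pos (a := t) (by norm_num)]
    have hbl : PySem.Int.bitLength (t - 1) = PySem.Int.bitLength (PySem.Int.floordiv (t - 1) 2) + 1 :=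
      PySem.Int.bitLength_of_pos (by omega)
    rw [PySem.Int.floordiv_eq_ediv_of_pos (by norm_num)] at hbl
    by_cases h2 : t / 2 + t % 2 > 1
    · have harg : t / 2 + t % 2 - 1 = (t - 1) / 2 := by omega
      rw [if_pos h2, if_pos h, harg, hbl]
      split_ifs <;> push_cast <;> ring
    · -- t = 2 or t = 3 cannot occur … actually t = 2 gives t/2+t%2 = 1; then (t-1)/2 = 0
      have ht2 : t = 2 := by omega
      subst ht2
      norm_num at hbl ⊢
      rw [hbl]
      split_ifs <;> omega
  · rw [countLoop, if_neg h, if_neg h, mul_zero, add_zero]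
termination_by t.toNat
decreasing_by
  rw [PySem.Int.floordiv_eq_ediv_of_pos (by norm_num), PySem.Int.mod_eq_emod_of_pos (by norm_num)]
  omega

-- the two "togethers" computations agree: ⌈x/2⌉ written as x//2 + x%2 vs (x+1)//2
theorem ceilhalf_eq (x : Int) :
    PySem.Int.floordiv x 2 + PySem.Int.mod x 2 = PySem.Int.floordiv (x + 1) 2 := by
  rw [PySem.Int.floordiv_eq_ediv_of_pos (by norm_num), PySem.Int.mod_eq_emod_of_pos (by norm_num),
      PySem.Int.floordiv_eq_ediv_of_pos (by norm_num)]
  omega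

-- ===== VERDICT (by name: the statement is the Claim_ definition above) =====
theorem countpennies_spec : Claim_equal_countpennies := by
  intro n ct _ _
  unfold Spec_countpennies countpennies countpennies_alt
  simp only []
  by_cases hr : PySem.Int.mod 256 n ≠ 0
  · rw [if_pos hr, if_pos hr, if_pos hr, countLoop_eq, ceilhalf_eq]
    split_ifs <;> push_cast <;> ring
  · rw [if_neg hr, if_neg hr, if_neg hr, countLoop_eq]
    simp only [not_not] at hr
    rw [hr, sub_zero]
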